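-- pv_equiv track=rewrite | github.com/kc0bfv/AdventOfCode | 2022/22/main.py | gen_splits
-- ===== SOURCE A (Python) =====
-- def gen_splits(line):
--     cur = ""
--     for char in line.strip("\n"):
--         if char == "R" or char == "L":
--             yield (int(cur), char)
--             cur = ""
--         else:
--             cur += char
--     if cur != "":
--         yield int(cur), None
-- ===== SOURCE B (Python) =====
-- def gen_splits(line):
--     def go(s):
--         i = next((k for k, c in enumerate(s) if c in ("R", "L")), -1)
--         if i == -1:
--             return [(int(s), None)] if s else []
--         return [(int(s[:i]), s[i])] + go(s[i + 1:])
--     yield from go(line.strip("\n"))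
-- ===== Notes on version B (the rewrite author's own statement) =====
-- stated objective: alternative
-- what changed: A accumulates the current number character by character in a mutable string inside one scan; B instead recurses on the structure: it finds the first R/L delimiter, slices the number off the front, emits the pair and recurses on the remainder.
import Mathlib
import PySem

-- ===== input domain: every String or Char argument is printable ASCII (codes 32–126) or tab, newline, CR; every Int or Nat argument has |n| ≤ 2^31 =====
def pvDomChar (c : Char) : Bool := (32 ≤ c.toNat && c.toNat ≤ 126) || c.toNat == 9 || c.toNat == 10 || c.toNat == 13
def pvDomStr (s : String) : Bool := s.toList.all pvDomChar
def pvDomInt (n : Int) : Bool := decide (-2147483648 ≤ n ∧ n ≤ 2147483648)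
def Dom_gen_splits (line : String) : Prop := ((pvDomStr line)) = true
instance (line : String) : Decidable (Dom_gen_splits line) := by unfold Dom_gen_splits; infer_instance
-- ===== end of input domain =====

-- B rewrites A's accumulating character scan as structural recursion: find the first R/L, slice the
-- number off, recurse on the remainder (objective: alternative decomposition, same cost).
-- Both Pythons are generators; equivalence is about the fully consumed sequence of yielded pairs.

-- ===== PORT A =====
-- state: (yielded pairs so far, cur)
def pvStepA (st : List (Int × Option String) × List Char) (char : Char) :
    List (Int × Option String) × List Char :=
  if char = 'R' ∨ char = 'L' then
    (st.1 ++ [((PySem.Int.ofChars? st.2).getD 0, some (String.ofList [char]))], [])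
  else
    (st.1, st.2 ++ [char])

def gen_splits (line : String) : List (Int × Option String) :=
  let st := (PySem.Str.stripChars line "\n").toList.foldl pvStepA ([], [])
  if st.2 ≠ [] then st.1 ++ [((PySem.Int.ofChars? st.2).getD 0, none)] else st.1

-- ===== PORT B =====
def pvDelim (c : Char) : Bool := c == 'R' || c == 'L'   -- c in ("R", "L")

-- go(s): index of first delimiter = boundary of takeWhile/dropWhile; s[:i], s[i], s[i+1:]
def pvGoB (cs : List Char) : List (Int × Option String) :=
  match h : cs.dropWhile (fun c => !pvDelim c) with
  | [] => if cs.isEmpty then [] else [((PySem.Int.ofChars? cs).getD 0, none)]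
  | d :: tl =>
      ((PySem.Int.ofChars? (cs.takeWhile (fun c => !pvDelim c))).getD 0, some (String.ofList [d]))
        :: pvGoB tl
termination_by cs.length
decreasing_by
  have hle := List.length_dropWhile_le (fun c => !pvDelim c) cs
  rw [h] at hle; simp at hle; omega

def gen_splits_alt (line : String) : List (Int × Option String) :=
  pvGoB (PySem.Str.stripChars line "\n").toList

-- ===== PRECONDITION & SPEC =====
-- the maximal runs between the R/L delimiters (Python's cur strings), as a shape description
def pvSegsRL : List Char → List (List Char)
  | [] => [[]]
  | c :: rest =>
      if pvDelim c then [] :: pvSegsRL rest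
      else
        match pvSegsRL rest with
        | s :: ss => (c :: s) :: ss
        | [] => [[c]]

-- Pre_ excludes exactly the inputs on which Python A raises ValueError: some int(cur) call fails,
-- i.e. a run before an R/L (possibly empty) or a nonempty trailing run is not a valid int literal.
def Pre_gen_splits (line : String) : Prop :=
  let segs := pvSegsRL (PySem.Chars.stripChars line.toList ['\n'])
  (∀ s ∈ segs.dropLast, (PySem.Int.ofChars? s).isSome = true) ∧
  ((segs.getLastD []) ≠ [] → (PySem.Int.ofChars? (segs.getLastD [])).isSome = true)

instance (line : String) : Decidable (Pre_gen_splits line) := by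
  unfold Pre_gen_splits; infer_instance

def pvWitness_gen_splits : String := "10R5L2"

def Spec_gen_splits (line : String) (out : List (Int × Option String)) : Prop :=
  out = gen_splits_alt line
instance (line : String) (out : List (Int × Option String)) : Decidable (Spec_gen_splits line out) := by
  unfold Spec_gen_splits; infer_instance

-- ===== CLAIM (what is proved, stated in full; the proofs are below) =====
def Claim_equal_gen_splits : Prop :=
  ∀ (line : String), Dom_gen_splits line → Pre_gen_splits line →
    Spec_gen_splits line (gen_splits line)

-- ===== LEMMAS AND PROOFS =====

theorem pvGoB_no_delim (cs : List Char) (h : ∀ c ∈ cs, pvDelim c = false) :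
    pvGoB cs = if cs.isEmpty then [] else [((PySem.Int.ofChars? cs).getD 0, none)] := by
  have hd : cs.dropWhile (fun c => !pvDelim c) = [] := by
    simp [List.dropWhile_eq_nil_iff]
    intro c hc; exact h c hc
  rw [pvGoB]
  split
  · rfl
  · rename_i d tl hmatch; rw [hd] at hmatch; cases hmatch

theorem pvGoB_delim (cur : List Char) (c : Char) (rest : List Char)
    (hcur : ∀ x ∈ cur, pvDelim x = false) (hc : pvDelim c = true) :
    pvGoB (cur ++ c :: rest) =
      ((PySem.Int.ofChars? cur).getD 0, some (String.ofList [c])) :: pvGoB rest := by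
  have hc1 : cur.dropWhile (fun x => !pvDelim x) = [] := by
    rw [List.dropWhile_eq_nil_iff]
    intro x hx; simpa using hcur x hx
  have hc2 : cur.takeWhile (fun x => !pvDelim x) = cur := by
    rw [List.takeWhile_eq_self_iff]
    intro x hx; simpa using hcur x hx
  have hdw : (cur ++ c :: rest).dropWhile (fun x => !pvDelim x) = c :: rest := by
    rw [List.dropWhile_append, hc1]; simp [hc]
  have htw : (cur ++ c :: rest).takeWhile (fun x => !pvDelim x) = cur := by
    rw [List.takeWhile_append, hc2]; simp [hc]
  rw [pvGoB]
  split
  · rename_i hmatch; rw [hdw] at hmatch; cases hmatch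
  · rename_i d tl hmatch
    rw [hdw] at hmatch
    cases hmatch
    rw [htw]

theorem pvFoldA_eq (cs : List Char) :
    ∀ (acc : List (Int × Option String)) (cur : List Char),
      (∀ x ∈ cur, pvDelim x = false) →
      (let st := cs.foldl pvStepA (acc, cur);
       if st.2 ≠ [] then st.1 ++ [((PySem.Int.ofChars? st.2).getD 0, none)] else st.1)
        = acc ++ pvGoB (cur ++ cs) := by
  induction cs with
  | nil =>
      intro acc cur hcur
      simp only [List.foldl_nil, List.append_nil]
      rw [pvGoB_no_delim cur hcur]
      by_cases h : cur = []
      · subst h; simp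
      · simp [h]
  | cons c cs ih =>
      intro acc cur hcur
      by_cases hc : pvDelim c = true
      · have hor : c = 'R' ∨ c = 'L' := by
          simp [pvDelim] at hc; exact hc
        simp only [List.foldl_cons, pvStepA, if_pos hor]
        rw [ih (acc ++ [((PySem.Int.ofChars? cur).getD 0, some (String.ofList [c]))]) [] (by simp)]
        rw [pvGoB_delim cur c cs hcur hc]
        simp
      · have hor : ¬ (c = 'R' ∨ c = 'L') := by
          simp [pvDelim] at hc; tauto
        simp only [List.foldl_cons, pvStepA, if_neg hor]
        have hcur' : ∀ x ∈ cur ++ [c], pvDelim x = false := by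
          intro x hx
          rcases List.mem_append.mp hx with h | h
          · exact hcur x h
          · simp at h; subst h; simpa using hc
        rw [ih acc (cur ++ [c]) hcur']
        simp

-- ===== VERDICT (by name: the statement is the Claim_ definition above) =====
theorem gen_splits_spec : Claim_equal_gen_splits := by
  intro line _ _
  unfold Spec_gen_splits gen_splits gen_splits_alt
  have := pvFoldA_eq (PySem.Str.stripChars line "\n").toList [] [] (by simp)
  simpa using this
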